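-- pv_equiv track=rewrite | github.com/vitalvightz/unlxck-gpt-webhook | fightcamp/diagnostics.py | _has_lower_limb_injury
-- ===== SOURCE A (Python) =====
-- def _has_lower_limb_injury(injuries: list[str]) -> bool:
--     keywords = {
--         "ankle",
--         "foot",
--         "toe",
--         "calf",
--         "achilles",
--         "knee",
--         "hamstring",
--         "quad",
--         "thigh",
--         "hip",
--         "groin",
--         "shin",
--         "tibia",
--     }
--     for entry in injuries:
--         text = entry.lower()
--         if any(keyword in text for keyword in keywords):
--             return True
--     return False
-- ===== SOURCE B (Python) =====
-- _KEYWORDS = (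
--     "ankle", "foot", "toe", "calf", "achilles", "knee", "hamstring",
--     "quad", "thigh", "hip", "groin", "shin", "tibia",
-- )
--
--
-- def _scan(text):
--     # single left-to-right pass: at each position, test whether any keyword
--     # starts there (keyword-anchored prefix match instead of repeated 'in' scans)
--     for i in range(len(text)):
--         if any(text.startswith(k, i) for k in _KEYWORDS):
--             return True
--     return False
--
--
-- def _has_lower_limb_injury(injuries: list[str]) -> bool:
--     for entry in injuries:
--         if _scan(entry.lower()):
--             return True
--     return False
-- ===== Notes on version B (the rewrite author's own statement) =====
-- stated objective: alternative
-- what changed: Replaces the per-keyword substring ('in') scans with a single left-to-right scan of each lowercased entry that tests, at every position, whether any keyword starts there (anchored prefix match).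
import Mathlib
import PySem

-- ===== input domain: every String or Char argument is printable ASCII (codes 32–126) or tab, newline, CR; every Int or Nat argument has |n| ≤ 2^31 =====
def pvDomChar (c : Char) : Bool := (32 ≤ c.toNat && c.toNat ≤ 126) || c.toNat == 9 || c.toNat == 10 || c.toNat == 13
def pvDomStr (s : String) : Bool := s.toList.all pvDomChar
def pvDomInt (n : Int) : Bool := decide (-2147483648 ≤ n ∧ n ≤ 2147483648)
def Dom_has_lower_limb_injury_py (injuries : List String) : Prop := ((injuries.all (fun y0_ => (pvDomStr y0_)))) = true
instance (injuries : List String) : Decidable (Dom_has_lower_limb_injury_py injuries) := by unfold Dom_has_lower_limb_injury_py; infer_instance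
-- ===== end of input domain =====

-- ===== PORT A =====
-- B ≡ A on all inputs: same keyword-containment test, done by an anchored positional scan instead of per-keyword 'in' scans (alternative decomposition; no speed claim).
def pvKwSetA : PySem.Set String := PySem.Set.ofList
  ["ankle", "foot", "toe", "calf", "achilles", "knee", "hamstring",
   "quad", "thigh", "hip", "groin", "shin", "tibia"]

def has_lower_limb_injury_py : List String → Bool
  | [] => false
  | entry :: rest =>
    let text := PySem.Str.lower entry
    if pvKwSetA.any (fun keyword => PySem.Str.isIn keyword text) then true
    else has_lower_limb_injury_py rest

-- ===== PORT B =====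
def pvKwB : List String :=
  ["ankle", "foot", "toe", "calf", "achilles", "knee", "hamstring",
   "quad", "thigh", "hip", "groin", "shin", "tibia"]

-- _scan: 'for i in range(len(text)): if any(text.startswith(k, i) …)'.
-- text.startswith(k, i) is ported exactly as a prefix test on the i-th suffix
-- (Chars.startswith (text.toList.drop i) k.toList); the recursion walks the suffixes.
def pvScanB : List Char → Bool
  | [] => false
  | c :: rest =>
    (pvKwB.any (fun k => PySem.Chars.startswith (c :: rest) k.toList)) || pvScanB rest

def has_lower_limb_injury_py_alt (injuries : List String) : Bool :=
  injuries.any (fun entry => pvScanB (PySem.Str.lower entry).toList)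

-- ===== PRECONDITION & SPEC =====
def Spec_has_lower_limb_injury_py (injuries : List String) (out : Bool) : Prop := out = has_lower_limb_injury_py_alt injuries
instance (injuries : List String) (out : Bool) : Decidable (Spec_has_lower_limb_injury_py injuries out) := by unfold Spec_has_lower_limb_injury_py; infer_instance

-- ===== CLAIM (what is proved, stated in full; the proofs are below) =====
def Claim_equal_has_lower_limb_injury_py : Prop := ∀ (injuries : List String), Dom_has_lower_limb_injury_py injuries → Spec_has_lower_limb_injury_py injuries (has_lower_limb_injury_py injuries)

-- ===== LEMMAS AND PROOFS =====

theorem pvScanB_iff (l : List Char) :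
    pvScanB l = true ↔ ∃ k ∈ pvKwB, ∃ j, k.toList <+: l.drop j := by
  induction l with
  | nil =>
    simp [pvScanB, pvKwB]
  | cons c rest ih =>
    simp only [pvScanB, Bool.or_eq_true, List.any_eq_true, ih,
      PySem.Chars.startswith_iff]
    constructor
    · rintro (⟨k, hk, hp⟩ | ⟨k, hk, j, hp⟩)
      · exact ⟨k, hk, 0, by simpa using hp⟩
      · exact ⟨k, hk, j + 1, by simpa using hp⟩
    · rintro ⟨k, hk, j, hp⟩
      cases j with
      | zero => exact Or.inl ⟨k, hk, by simpa using hp⟩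
      | succ j => exact Or.inr ⟨k, hk, j, by simpa using hp⟩

theorem pvEntry_eq (text : String) :
    pvKwSetA.any (fun keyword => PySem.Str.isIn keyword text) = pvScanB text.toList := by
  have hset : pvKwSetA = pvKwB := by decide
  rw [hset]
  by_cases h : pvScanB text.toList = true
  · rw [h]
    rw [pvScanB_iff] at h
    obtain ⟨k, hk, j, hp⟩ := h
    have : PySem.Str.isIn k text = true := by
      rw [PySem.Str.isIn_iff_infix, ← PySem.Chars.isIn_iff_infix,
        ← PySem.Chars.exists_prefix_drop_iff_isIn]
      exact ⟨j, hp⟩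
    simp [List.any_eq_true]
    exact ⟨k, hk, this⟩
  · rw [Bool.not_eq_true] at h
    rw [h]
    rw [List.any_eq_false]
    intro k hk
    simp only [Bool.not_eq_true]
    by_contra hc
    rw [Bool.not_eq_false, PySem.Str.isIn_iff_infix, ← PySem.Chars.isIn_iff_infix,
      ← PySem.Chars.exists_prefix_drop_iff_isIn] at hc
    obtain ⟨j, hp⟩ := hc
    have : pvScanB text.toList = true := (pvScanB_iff _).mpr ⟨k, hk, j, hp⟩
    simp [h] at this

-- ===== VERDICT (by name: the statement is the Claim_ definition above) =====
theorem has_lower_limb_injury_py_spec : Claim_equal_has_lower_limb_injury_py := by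
  intro injuries hdom
  unfold Spec_has_lower_limb_injury_py
  induction injuries with
  | nil => rfl
  | cons e rest ih =>
    have hd : Dom_has_lower_limb_injury_py rest := by
      unfold Dom_has_lower_limb_injury_py at hdom ⊢
      simp only [List.all_cons, Bool.and_eq_true] at hdom
      exact hdom.2
    simp only [has_lower_limb_injury_py, has_lower_limb_injury_py_alt, List.any_cons]
    rw [pvEntry_eq (PySem.Str.lower e)]
    have ih' : has_lower_limb_injury_py rest
        = rest.any (fun entry => pvScanB (PySem.Str.lower entry).toList) := ih hd
    rw [ih']
    by_cases h : pvScanB (PySem.Str.lower e).toList = true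
    · rw [if_pos h, h, Bool.true_or]
    · rw [if_neg h, Bool.not_eq_true] at *
      rw [h, Bool.false_or]
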